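-- pv_equiv track=rewrite | github.com/consultant-1379/nssutilities | ERICnssutilities_CXP9035994/nssutils/lib/node_populator.py | operation_result
-- ===== SOURCE A (Python) =====
-- def operation_result(results):
--     """
--     Determines the success/failure of an operation
--
--     :return: a text whether is a pass, fail or unattempted
--     :rtype: str
--     """
--     passes = 0
--     unattempted = 0
--
--     for result in results:
--         if result[1] == "PASS" or result[1] == "WARN":
--             passes += 1
--         elif result[1] == "UNATTEMPTED":
--             unattempted += 1
--
--     if unattempted == len(results):
--         return "UNATTEMPTED"
--
--     if passes == len(results):
--         return "PASS"
--     else: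
--         return "FAIL"
-- ===== SOURCE B (Python) =====
-- def operation_result(results):
--     """
--     Determines the success/failure of an operation
--
--     :return: a text whether is a pass, fail or unattempted
--     :rtype: str
--     """
--     # Classify each row into a three-valued status and combine statuses with a
--     # join: equal statuses keep the status, any disagreement collapses to FAIL.
--     verdict = None
--     for result in results:
--         value = result[1]
--         if value == "UNATTEMPTED":
--             status = "UNATTEMPTED"
--         elif value == "PASS" or value == "WARN":
--             status = "PASS"
--         else:
--             status = "FAIL"
--         if verdict is None:
--             verdict = status
--         elif verdict != status:
--             verdict = "FAIL"
--     return verdict if verdict is not None else "UNATTEMPTED"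
-- ===== Notes on version B (the rewrite author's own statement) =====
-- stated objective: alternative
-- what changed: Replaced the two-counter counting loop compared against len(results) by a single-pass state machine that classifies each row into a three-valued status and folds with a join (equal statuses kept, any disagreement collapses to FAIL), with UNATTEMPTED for the empty list.
import Mathlib
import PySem

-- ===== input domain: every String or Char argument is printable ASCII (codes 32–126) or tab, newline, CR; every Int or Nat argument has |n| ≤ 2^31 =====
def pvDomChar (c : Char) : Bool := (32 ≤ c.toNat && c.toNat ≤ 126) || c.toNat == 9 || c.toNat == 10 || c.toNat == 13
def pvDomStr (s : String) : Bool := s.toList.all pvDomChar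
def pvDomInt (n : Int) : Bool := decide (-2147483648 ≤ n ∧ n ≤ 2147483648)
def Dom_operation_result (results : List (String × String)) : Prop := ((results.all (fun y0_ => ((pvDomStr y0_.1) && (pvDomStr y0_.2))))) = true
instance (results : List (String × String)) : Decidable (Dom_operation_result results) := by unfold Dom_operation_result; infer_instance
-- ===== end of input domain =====

-- B replaces A's two-counter loop compared against len(results) by a single-pass
-- join-semilattice state machine over per-row statuses (alternative decomposition).

-- ===== PORT A =====
-- literal port: one fold maintaining the two counters, then the counter/length tests
def operation_result (results : List (String × String)) : String :=
  let st := results.foldl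
    (fun (s : Int × Int) result =>
      if result.2 == "PASS" || result.2 == "WARN" then (s.1 + 1, s.2)
      else if result.2 == "UNATTEMPTED" then (s.1, s.2 + 1)
      else s)
    (0, 0)
  if st.2 == (results.length : Int) then "UNATTEMPTED"
  else if st.1 == (results.length : Int) then "PASS"
  else "FAIL"

-- ===== PORT B =====
-- classify each row into a three-valued status
def pvClassify (v : String) : String :=
  if v == "UNATTEMPTED" then "UNATTEMPTED"
  else if v == "PASS" || v == "WARN" then "PASS"
  else "FAIL"

-- join step: first row sets the verdict, any disagreement collapses to FAIL
def pvJoin (acc : Option String) (r : String × String) : Option String :=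
  let s := pvClassify r.2
  match acc with
  | none => some s
  | some v => some (if v == s then v else "FAIL")

def operation_result_alt (results : List (String × String)) : String :=
  (results.foldl pvJoin none).getD "UNATTEMPTED"

-- ===== PRECONDITION & SPEC =====
def Spec_operation_result (results : List (String × String)) (out : String) : Prop := out = operation_result_alt results
instance (results : List (String × String)) (out : String) : Decidable (Spec_operation_result results out) := by unfold Spec_operation_result; infer_instance

-- ===== CLAIM =====
def Claim_equal_operation_result : Prop := ∀ (results : List (String × String)), Dom_operation_result results → Spec_operation_result results (operation_result results)

-- ===== LEMMAS AND PROOFS =====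

def pvPass (r : String × String) : Bool := r.2 == "PASS" || r.2 == "WARN"
def pvUnatt (r : String × String) : Bool := !(pvPass r) && (r.2 == "UNATTEMPTED")

theorem pv_foldl_counts (l : List (String × String)) (a b : Int) :
    l.foldl
      (fun (s : Int × Int) result =>
        if result.2 == "PASS" || result.2 == "WARN" then (s.1 + 1, s.2)
        else if result.2 == "UNATTEMPTED" then (s.1, s.2 + 1)
        else s)
      (a, b) = (a + (l.countP pvPass : Int), b + (l.countP pvUnatt : Int)) := by
  induction l generalizing a b with
  | nil => simp
  | cons h t ih =>
    cases hp : (h.2 == "PASS" || h.2 == "WARN") with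
    | true =>
      simp only [List.foldl_cons, hp, if_true]
      rw [ih, List.countP_cons, List.countP_cons]
      have h1 : pvPass h = true := by simpa [pvPass] using hp
      have h2 : pvUnatt h = false := by simp [pvUnatt, pvPass, hp]
      simp only [h1, h2, if_true, Bool.false_eq_true, if_false, Prod.mk.injEq]
      constructor <;> push_cast <;> ring
    | false =>
      cases hu : (h.2 == "UNATTEMPTED") with
      | true =>
        simp only [List.foldl_cons, hp, hu, Bool.false_eq_true, if_false, if_true]
        rw [ih, List.countP_cons, List.countP_cons]
        have h1 : pvPass h = false := by simpa [pvPass] using hp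
        have h2 : pvUnatt h = true := by simp [pvUnatt, pvPass, hp, hu]
        simp only [h1, h2, if_true, Bool.false_eq_true, if_false, Prod.mk.injEq]
        constructor <;> push_cast <;> ring
      | false =>
        simp only [List.foldl_cons, hp, hu, Bool.false_eq_true, if_false]
        rw [ih, List.countP_cons, List.countP_cons]
        have h1 : pvPass h = false := by simpa [pvPass] using hp
        have h2 : pvUnatt h = false := by simp [pvUnatt, pvPass, hp, hu]
        simp [h1, h2]

theorem pv_countP_eq_len_iff (p : String × String → Bool) (l : List (String × String)) :
    (l.countP p = l.length) ↔ (l.all p = true) := by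
  rw [List.countP_eq_length, List.all_eq_true]

theorem pv_unatt_all (l : List (String × String)) :
    (l.all pvUnatt = true) ↔ (l.all (fun r => r.2 == "UNATTEMPTED") = true) := by
  simp only [List.all_eq_true, pvUnatt, pvPass]
  constructor
  · intro h x hx
    exact ((Bool.and_eq_true _ _).mp (h x hx)).2
  · intro h x hx
    have hu : x.2 = "UNATTEMPTED" := by simpa using h x hx
    simp [hu]

-- folding from an established verdict v: result is v while every status agrees, else FAIL
theorem pv_foldl_join_some (l : List (String × String)) (v : String) :
    l.foldl pvJoin (some v) =
      some (if l.all (fun r => pvClassify r.2 == v) then v else "FAIL") := by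
  induction l generalizing v with
  | nil => simp
  | cons h t ih =>
    cases hv : (pvClassify h.2 == v) with
    | true =>
      have hv' : (v == pvClassify h.2) = true := by
        rw [beq_iff_eq] at hv ⊢; exact hv.symm
      simp only [List.foldl_cons, pvJoin, hv', if_true, ih, List.all_cons, hv, Bool.true_and]
    | false =>
      have hv' : (v == pvClassify h.2) = false := by
        rw [beq_eq_false_iff_ne] at hv ⊢; exact fun e => hv e.symm
      simp only [List.foldl_cons, pvJoin, hv', Bool.false_eq_true, if_false, ih,
        List.all_cons, hv, Bool.false_and, Bool.false_eq_true, if_false]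
      by_cases ha : t.all (fun r => pvClassify r.2 == "FAIL") = true <;> simp [ha]

theorem pv_classify_eq_U (r : String × String) :
    (pvClassify r.2 == "UNATTEMPTED") = (r.2 == "UNATTEMPTED") := by
  unfold pvClassify
  by_cases hu : r.2 = "UNATTEMPTED" <;> by_cases hp : (r.2 == "PASS" || r.2 == "WARN") = true <;>
    simp_all

theorem pv_classify_eq_P (r : String × String) :
    (pvClassify r.2 == "PASS") = (r.2 == "PASS" || r.2 == "WARN") := by
  unfold pvClassify
  by_cases hu : r.2 = "UNATTEMPTED" <;> by_cases hp : (r.2 == "PASS" || r.2 == "WARN") = true <;>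
    simp_all

-- B computes the same value as the two predicate tests in priority order
theorem pv_alt_allform (l : List (String × String)) :
    operation_result_alt l =
      (if l.all (fun r => r.2 == "UNATTEMPTED") then "UNATTEMPTED"
       else if l.all (fun r => r.2 == "PASS" || r.2 == "WARN") then "PASS"
       else "FAIL") := by
  cases l with
  | nil => simp [operation_result_alt]
  | cons h t =>
    have hfU : (fun r : String × String => pvClassify r.2 == "UNATTEMPTED")
        = (fun r : String × String => r.2 == "UNATTEMPTED") :=
      funext fun r => pv_classify_eq_U r
    have hfP : (fun r : String × String => pvClassify r.2 == "PASS")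
        = (fun r : String × String => r.2 == "PASS" || r.2 == "WARN") :=
      funext fun r => pv_classify_eq_P r
    unfold operation_result_alt
    rw [show (h :: t).foldl pvJoin none = t.foldl pvJoin (some (pvClassify h.2)) from rfl,
      pv_foldl_join_some]
    by_cases hu : h.2 = "UNATTEMPTED"
    · have hc : pvClassify h.2 = "UNATTEMPTED" := by simp [pvClassify, hu]
      have hu2 : (h.2 == "UNATTEMPTED") = true := by simp [hu]
      have hp2 : (h.2 == "PASS" || h.2 == "WARN") = false := by simp [hu]
      rw [hc, hfU]
      simp only [Option.getD_some, List.all_cons, hu2, hp2, Bool.true_and, Bool.false_and,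
        Bool.false_eq_true, if_false]
    · by_cases hp : (h.2 == "PASS" || h.2 == "WARN") = true
      · have hc : pvClassify h.2 = "PASS" := by simp [pvClassify, hu, hp]
        have hu2 : (h.2 == "UNATTEMPTED") = false := by simp [hu]
        rw [hc, hfP]
        simp only [Option.getD_some, List.all_cons, hu2, hp, Bool.true_and, Bool.false_and,
          Bool.false_eq_true, if_false]
      · have hc : pvClassify h.2 = "FAIL" := by simp [pvClassify, hu, hp]
        have hu2 : (h.2 == "UNATTEMPTED") = false := by simp [hu]
        have hp2 : (h.2 == "PASS" || h.2 == "WARN") = false := by simpa using hp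
        rw [hc]
        simp only [Option.getD_some, List.all_cons, hu2, hp2, Bool.false_and,
          Bool.false_eq_true, if_false]
        all_goals by_cases ht : t.all (fun r => pvClassify r.2 == "FAIL") = true <;> simp [ht]

theorem operation_result_eq (results : List (String × String)) :
    operation_result results = operation_result_alt results := by
  rw [pv_alt_allform]
  unfold operation_result
  rw [pv_foldl_counts]
  simp only [zero_add]
  by_cases h1 : results.countP pvUnatt = results.length
  · have hb : results.all (fun r => r.2 == "UNATTEMPTED") = true :=
      (pv_unatt_all results).1 ((pv_countP_eq_len_iff _ _).1 h1)
    have heq : (((results.countP pvUnatt : Int)) == ((results.length : Int))) = true := by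
      simp [h1]
    simp only [heq, hb, if_true]
  · have hb : results.all (fun r => r.2 == "UNATTEMPTED") = false := by
      rw [Bool.eq_false_iff]
      intro hall
      exact h1 ((pv_countP_eq_len_iff _ _).2 ((pv_unatt_all results).2 hall))
    have hne : (((results.countP pvUnatt : Int)) == ((results.length : Int))) = false := by
      rw [beq_eq_false_iff_ne]
      exact_mod_cast h1
    by_cases h2 : results.countP pvPass = results.length
    · have hp : results.all (fun r => r.2 == "PASS" || r.2 == "WARN") = true := by
        have := (pv_countP_eq_len_iff pvPass results).1 h2
        simpa [pvPass] using this
      have heq2 : (((results.countP pvPass : Int)) == ((results.length : Int))) = true := by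
        simp [h2]
      simp [hne, hb, heq2, hp]
    · have hp : results.all (fun r => r.2 == "PASS" || r.2 == "WARN") = false := by
        rw [Bool.eq_false_iff]
        intro hall
        exact h2 ((pv_countP_eq_len_iff pvPass results).2 (by simpa [pvPass] using hall))
      have hne2 : (((results.countP pvPass : Int)) == ((results.length : Int))) = false := by
        rw [beq_eq_false_iff_ne]
        exact_mod_cast h2
      simp only [hne, hne2, hb, hp, Bool.false_eq_true, if_false]

-- ===== VERDICT =====
theorem operation_result_spec : Claim_equal_operation_result := by
  intro results _
  unfold Spec_operation_result
  exact operation_result_eq results
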